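-- pv_equiv track=rewrite | github.com/ecnu-sea/SEAGraph | code/smg.py | split_by_references
-- ===== SOURCE A (Python) =====
-- def split_by_references(lines):
--     references_start = -1
--     next_section_start = -1
--
--     for i, line in enumerate(lines):
--         if line.startswith("## References"):
--             references_start = i
--             break
--
--     if references_start != -1:
--         for j in range(references_start + 1, len(lines)):
--             if lines[j].startswith("##"):
--                 next_section_start = j
--                 break
--
--     if references_start != -1 and next_section_start != -1:
--         references_section = lines[references_start:next_section_start]
--         remaining_content = lines[:references_start] + lines[next_section_start:]
--     elif references_start != -1:
--         references_section = lines[references_start:]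
--         remaining_content = lines[:references_start]
--     else:
--         references_section = []
--         remaining_content = lines
--
--     return references_section, remaining_content
-- ===== SOURCE B (Python) =====
-- def split_by_references(lines):
--     remaining = []
--     references = []
--     found_ref = False
--     in_ref = False
--     for line in lines:
--         if not found_ref and line.startswith("## References"):
--             found_ref = True
--             in_ref = True
--             references.append(line)
--         elif in_ref and line.startswith("##"):
--             in_ref = False
--             remaining.append(line)
--         elif in_ref:
--             references.append(line)
--         else:
--             remaining.append(line)
--     return references, remaining
-- ===== Notes on version B (the rewrite author's own statement) =====
-- stated objective: alternative
-- what changed: A scans for the '## References' index and the next '##' index and then rebuilds the split with slicing/concatenation; B makes a single pass over the lines with two accumulators and two state flags, never indexing or slicing.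
import Mathlib
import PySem

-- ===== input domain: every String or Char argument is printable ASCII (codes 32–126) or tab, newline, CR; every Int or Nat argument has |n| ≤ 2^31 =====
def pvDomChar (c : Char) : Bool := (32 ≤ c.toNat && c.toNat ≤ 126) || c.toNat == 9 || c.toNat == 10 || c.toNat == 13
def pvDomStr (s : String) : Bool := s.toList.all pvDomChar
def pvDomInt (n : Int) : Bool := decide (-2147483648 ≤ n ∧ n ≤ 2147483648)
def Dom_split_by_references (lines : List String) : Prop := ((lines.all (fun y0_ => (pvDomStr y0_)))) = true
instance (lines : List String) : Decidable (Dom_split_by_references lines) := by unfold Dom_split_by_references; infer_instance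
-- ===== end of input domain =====

-- B replaces A's index-search-plus-slicing with a single stateful pass building both lists; same cost, different decomposition.

-- ===== PORT A =====
-- first loop: enumerate with break, returning the index or the -1 sentinel
def pvFindRef : List String → Int → Int
  | [], _ => -1
  | l :: ls, i => if PySem.Str.startswith l "## References" then i else pvFindRef ls (i + 1)

-- second loop: for j in range(references_start+1, len(lines)) with break
-- (lines[j] is ported as pyGetD with default ""; every j produced by pyRange is in range, where pyGetD is exact)
def pvFindNext : List String → List Int → Int
  | _, [] => -1
  | lines, j :: js =>
    if PySem.Str.startswith (PySem.List.pyGetD lines j "") "##" then j else pvFindNext lines js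

def split_by_references (lines : List String) : List String × List String :=
  let references_start := pvFindRef lines 0
  let next_section_start :=
    if references_start ≠ -1 then
      pvFindNext lines (PySem.List.pyRange (references_start + 1) (lines.length : Int) 1)
    else -1
  if references_start ≠ -1 ∧ next_section_start ≠ -1 then
    (PySem.List.slice lines (some references_start) (some next_section_start),
     PySem.List.slice lines none (some references_start) ++
       PySem.List.slice lines (some next_section_start) none)
  else if references_start ≠ -1 then
    (PySem.List.slice lines (some references_start) none,
     PySem.List.slice lines none (some references_start))
  else ([], lines)

-- ===== PORT B =====
-- the body of B's single loop
def pvStep (st : List String × List String × Bool × Bool) (line : String) :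
    List String × List String × Bool × Bool :=
  let (remaining, references, found_ref, in_ref) := st
  if !found_ref && PySem.Str.startswith line "## References" then
    (remaining, references ++ [line], true, true)
  else if in_ref && PySem.Str.startswith line "##" then
    (remaining ++ [line], references, found_ref, false)
  else if in_ref then
    (remaining, references ++ [line], found_ref, in_ref)
  else
    (remaining ++ [line], references, found_ref, in_ref)

def split_by_references_alt (lines : List String) : List String × List String :=
  let s := lines.foldl pvStep ([], [], false, false)
  (s.2.1, s.1)

-- ===== PRECONDITION & SPEC =====
def Spec_split_by_references (lines : List String) (out : List String × List String) : Prop := out = split_by_references_alt lines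
instance (lines : List String) (out : List String × List String) : Decidable (Spec_split_by_references lines out) := by unfold Spec_split_by_references; infer_instance

-- ===== CLAIM (what is proved, stated in full; the proofs are below) =====
def Claim_equal_split_by_references : Prop := ∀ (lines : List String), Dom_split_by_references lines → Spec_split_by_references lines (split_by_references lines)

-- ===== LEMMAS AND PROOFS =====

-- the two line tests, in the normal form simp's Str→Chars bridge produces
def pvSecP (l : String) : Bool := PySem.Chars.startswith l.toList ['#', '#']
def pvRefP (l : String) : Bool :=
  PySem.Chars.startswith l.toList ['#', '#', ' ', 'R', 'e', 'f', 'e', 'r', 'e', 'n', 'c', 'e', 's']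

@[simp] theorem pvSecP_eq (l : String) : PySem.Chars.startswith l.toList ['#', '#'] = pvSecP l := rfl
@[simp] theorem pvRefP_eq (l : String) :
    PySem.Chars.startswith l.toList ['#', '#', ' ', 'R', 'e', 'f', 'e', 'r', 'e', 'n', 'c', 'e', 's'] = pvRefP l := rfl
@[simp] theorem pvSecP_eq' (l : String) : PySem.Str.startswith l "##" = pvSecP l := by
  rw [PySem.Str.startswith_eq]; rfl
@[simp] theorem pvRefP_eq' (l : String) : PySem.Str.startswith l "## References" = pvRefP l := by
  rw [PySem.Str.startswith_eq]; rfl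

-- after the references section is closed, every line goes to `remaining`
theorem pv_fold_after (u : List String) : ∀ (rem refs : List String),
    u.foldl pvStep (rem, refs, true, false) = (rem ++ u, refs, true, false) := by
  induction u with
  | nil => intro rem refs; simp
  | cons x u ih =>
    intro rem refs
    simp only [List.foldl_cons, pvStep]
    simp [ih]

-- inside the references section: collect into `references` until the next '##' line
theorem pv_fold_inref (t : List String) : ∀ (rem refs : List String),
    t.foldl pvStep (rem, refs, true, true) =
      match t.dropWhile (fun l => !pvSecP l) with
      | [] => (rem, refs ++ t, true, true)
      | g :: u => (rem ++ g :: u, refs ++ t.takeWhile (fun l => !pvSecP l), true, false) := by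
  induction t with
  | nil => intro rem refs; simp
  | cons x t ih =>
    intro rem refs
    rw [List.foldl_cons]
    cases hx : pvSecP x with
    | true =>
      rw [show pvStep (rem, refs, true, true) x = (rem ++ [x], refs, true, false) by
        simp [pvStep, hx]]
      rw [pv_fold_after]
      simp [hx]
    | false =>
      rw [show pvStep (rem, refs, true, true) x = (rem, refs ++ [x], true, true) by
        simp [pvStep, hx]]
      rw [ih]
      simp only [List.dropWhile_cons, List.takeWhile_cons, hx, Bool.not_false, if_true]
      cases t.dropWhile (fun l => !pvSecP l) <;> simp

-- before the header: collect into `remaining` until the first '## References' line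
theorem pv_fold_before (ls : List String) : ∀ (rem : List String),
    ls.foldl pvStep (rem, [], false, false) =
      match ls.dropWhile (fun l => !pvRefP l) with
      | [] => (rem ++ ls, [], false, false)
      | h :: t => t.foldl pvStep (rem ++ ls.takeWhile (fun l => !pvRefP l), [h], true, true) := by
  induction ls with
  | nil => intro rem; simp
  | cons x ls ih =>
    intro rem
    rw [List.foldl_cons]
    cases hx : pvRefP x with
    | true =>
      rw [show pvStep (rem, [], false, false) x = (rem, [] ++ [x], true, true) by
        simp [pvStep, hx]]
      simp [hx]
    | false =>
      rw [show pvStep (rem, [], false, false) x = (rem ++ [x], [], false, false) by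
        simp [pvStep, hx]]
      rw [ih]
      simp only [List.dropWhile_cons, List.takeWhile_cons, hx, Bool.not_false, if_true]
      cases ls.dropWhile (fun l => !pvRefP l) <;> simp

-- A's first loop finds the index of the first '## References' line
theorem pv_findRef_eq (ls : List String) : ∀ (i : Int),
    pvFindRef ls i =
      match ls.dropWhile (fun l => !pvRefP l) with
      | [] => -1
      | _ :: _ => i + ((ls.takeWhile (fun l => !pvRefP l)).length : Int) := by
  induction ls with
  | nil => intro i; simp [pvFindRef]
  | cons x ls ih =>
    intro i
    simp only [pvFindRef, List.dropWhile_cons, List.takeWhile_cons, pvRefP_eq']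
    cases hx : pvRefP x with
    | true => simp
    | false =>
      simp only [Bool.false_eq_true, if_false, Bool.not_false, if_true]
      rw [ih]
      cases ls.dropWhile (fun l => !pvRefP l) <;> simp <;> ring

-- A's second loop, run from index pre.length, finds the first '##' line of the suffix T
theorem pv_findNext_eq (T : List String) : ∀ (pre : List String),
    pvFindNext (pre ++ T) (PySem.List.pyRange (pre.length : Int) (((pre ++ T).length : Nat) : Int) 1) =
      match T.dropWhile (fun l => !pvSecP l) with
      | [] => -1
      | _ :: _ => (pre.length : Int) + ((T.takeWhile (fun l => !pvSecP l)).length : Int) := by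
  induction T with
  | nil =>
    intro pre
    rw [show PySem.List.pyRange (pre.length : Int) (((pre ++ ([] : List String)).length : Nat) : Int) 1 = [] by
      simp [PySem.List.pyRange]]
    simp [pvFindNext]
  | cons x T ih =>
    intro pre
    have hlt : (pre.length : Int) < (((pre ++ x :: T).length : Nat) : Int) := by
      simp
    rw [PySem.List.pyRange_one_cons hlt]
    simp only [pvFindNext]
    have hget : PySem.List.pyGetD (pre ++ x :: T) (pre.length : Int) "" = x := by
      rw [PySem.List.pyGetD_natCast]
      simp
    rw [hget, show (PySem.Str.startswith x "##") = pvSecP x by simp]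
    cases hx : pvSecP x with
    | true => simp [hx]
    | false =>
      simp only [Bool.false_eq_true, if_false]
      have hre : pre ++ x :: T = (pre ++ [x]) ++ T := by simp
      have hlen : (pre.length : Int) + 1 = (((pre ++ [x]).length : Nat) : Int) := by
        simp
      rw [hre, hlen, ih (pre ++ [x])]
      simp only [List.dropWhile_cons, List.takeWhile_cons, hx, Bool.not_false, if_true]
      cases T.dropWhile (fun l => !pvSecP l) <;> simp <;> ring

-- ===== VERDICT (by name: the statement is the Claim_ definition above) =====
theorem split_by_references_spec : Claim_equal_split_by_references := by
  intro lines _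
  unfold Spec_split_by_references split_by_references split_by_references_alt
  have hsplit : lines.takeWhile (fun l => !pvRefP l) ++ lines.dropWhile (fun l => !pvRefP l) = lines :=
    List.takeWhile_append_dropWhile
  rw [pv_findRef_eq]
  rw [pv_fold_before]
  cases hrest : lines.dropWhile (fun l => !pvRefP l) with
  | nil => simp
  | cons h t =>
    set P := lines.takeWhile (fun l => !pvRefP l) with hP
    have hlines : lines = (P ++ [h]) ++ t := by
      rw [← hsplit, hrest]; simp
    have hr0 : (0 : Int) + (P.length : Int) = ((P.length : Nat) : Int) := by simp
    simp only [hr0]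
    have hrne : ((P.length : Nat) : Int) ≠ -1 := by omega
    rw [if_pos hrne]
    have hlen1 : ((P.length : Nat) : Int) + 1 = (((P ++ [h]).length : Nat) : Int) := by simp
    rw [hlines, hlen1, pv_findNext_eq t (P ++ [h])]
    rw [pv_fold_inref]
    cases hnd : t.dropWhile (fun l => !pvSecP l) with
    | nil =>
      simp only []
      rw [if_neg (by simp)]
      rw [if_pos hrne]
      rw [PySem.List.slice_from_natCast, PySem.List.slice_to_natCast]
      simp
    | cons g u =>
      set q := t.takeWhile (fun l => !pvSecP l) with hq
      have hqsplit : q ++ g :: u = t := by rw [hq, ← hnd]; exact List.takeWhile_append_dropWhile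
      clear_value q
      rw [show (((P ++ [h]).length : Nat) : Int) + ((q.length : Nat) : Int)
          = ((P.length + 1 + q.length : Nat) : Int) by simp [List.length_append]]
      have hcond : ((P.length : Nat) : Int) ≠ -1 ∧ (((P.length + 1 + q.length : Nat)) : Int) ≠ -1 :=
        ⟨hrne, by omega⟩
      rw [if_pos hcond]
      rw [PySem.List.slice_natCast, PySem.List.slice_to_natCast, PySem.List.slice_from_natCast]
      have hL : (P ++ [h]) ++ t = P ++ (h :: (q ++ g :: u)) := by rw [hqsplit]; simp
      rw [hL]
      simp only [Prod.mk.injEq]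
      constructor
      · -- references side: lines[references_start:next_section_start] = the header line plus q
        rw [show List.drop P.length (P ++ (h :: (q ++ g :: u))) = h :: (q ++ g :: u) by simp]
        rw [show P.length + 1 + q.length - P.length = q.length + 1 by omega]
        simp
      · -- remaining side: lines[:references_start] + lines[next_section_start:]
        rw [show List.take P.length (P ++ (h :: (q ++ g :: u))) = P by simp]
        rw [show List.drop (P.length + 1 + q.length) (P ++ (h :: (q ++ g :: u))) = g :: u by
          rw [show P ++ (h :: (q ++ g :: u)) = (P ++ h :: q) ++ g :: u by simp]
          rw [show P.length + 1 + q.length = (P ++ h :: q).length by simp [List.length_append]; omega]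
          exact List.drop_left]
        simp
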